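-- pv_equiv track=rewrite | github.com/MTantos/AdventOfCode2021 | src/day17.py | next_x_vel
-- ===== SOURCE A (Python) =====
-- def next_x_vel(x_vel: int, min_x: int, max_x: int) -> tuple[int,int]:
--     t = 0
--     while x_vel < max_x:
--         t = 1
--         x_vel += 1
--         x_pos = x_vel
--         while x_pos <= max_x:
--             if x_pos >= min_x:
--                 return x_vel, t
--             t += 1
--             x_pos += x_vel
--     return x_vel, t
-- ===== SOURCE B (Python) =====
-- def next_x_vel(x_vel: int, min_x: int, max_x: int) -> tuple[int, int]:
--     for v in range(x_vel + 1, max_x + 1):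
--         t = -(-min_x // v)  # smallest step count with t*v >= min_x (for v >= 1)
--         if t < 1:
--             t = 1
--         if t * v <= max_x:
--             return v, t
--     return x_vel, 0
-- ===== Notes on version B (the rewrite author's own statement) =====
-- stated objective: alternative
-- what changed: The inner while-loop that steps x_pos through the multiples of each candidate velocity is replaced by a closed-form ceiling division t = ceil(min_x/v) verified by t*v <= max_x, so the inner scan disappears (one O(1) check per candidate).
-- intended difference: On empty target ranges (min_x > max_x) with x_vel < max_x, A returns (max_x, 2) where the 2 is leftover loop state from the last exhausted inner scan; B returns (x_vel, 0) (no velocity found, zero steps), the intended 'nothing found' answer matching A's own no-search return shape (x_vel, t=0). — e.g. on next_x_vel(0, 5, 3): A returns (3, 2), B returns (0, 0)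
-- outside the precondition, e.g. on next_x_vel(-3, -3, 5): A returns (-2, 1), B returns (-2, 2); on next_x_vel(-1, 0, 5): A returns (0, 1), B raises ZeroDivisionError
import Mathlib
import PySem

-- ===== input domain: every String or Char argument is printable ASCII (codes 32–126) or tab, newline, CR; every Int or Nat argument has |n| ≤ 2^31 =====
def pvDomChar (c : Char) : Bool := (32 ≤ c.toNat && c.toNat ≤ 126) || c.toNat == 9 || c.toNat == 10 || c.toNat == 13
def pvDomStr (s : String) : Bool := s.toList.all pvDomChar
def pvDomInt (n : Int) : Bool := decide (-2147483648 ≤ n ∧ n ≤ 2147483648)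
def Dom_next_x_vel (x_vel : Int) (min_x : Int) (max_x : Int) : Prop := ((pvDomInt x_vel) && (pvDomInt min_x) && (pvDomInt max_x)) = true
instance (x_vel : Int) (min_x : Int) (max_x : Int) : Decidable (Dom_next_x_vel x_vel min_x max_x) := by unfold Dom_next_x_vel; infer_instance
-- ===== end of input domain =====

-- B replaces A's inner position-stepping scan by a closed-form ceiling division per candidate velocity (alternative algorithm; no inner loop).

-- ===== PORT A =====
-- inner 'while x_pos <= max_x' loop of A; the leading 'v ≤ 0' guard only makes the
-- recursion total (under Pre_ every candidate v is ≥ 1 and the guard never fires;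
-- the Python diverges on those excluded inputs)
def innerA (v : Int) (min_x : Int) (max_x : Int) (x_pos : Int) (t : Int) :
    Option (Int × Int) × Int :=
  if _h : v ≤ 0 then (none, t)
  else if _h2 : x_pos ≤ max_x then
    if min_x ≤ x_pos then (some (v, t), t)
    else innerA v min_x max_x (x_pos + v) (t + 1)
  else (none, t)
termination_by (max_x + 1 - x_pos).toNat
decreasing_by omega

-- outer 'while x_vel < max_x' loop of A; t is threaded through (A's t leaks out of the inner loop)
def outerA (x_vel : Int) (min_x : Int) (max_x : Int) (t : Int) : Int × Int :=
  if _h : x_vel < max_x then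
    let r := innerA (x_vel + 1) min_x max_x (x_vel + 1) 1
    match r.1 with
    | some p => p
    | none => outerA (x_vel + 1) min_x max_x r.2
  else (x_vel, t)
termination_by (max_x - x_vel).toNat
decreasing_by omega

def next_x_vel (x_vel : Int) (min_x : Int) (max_x : Int) : Int × Int :=
  outerA x_vel min_x max_x 0

-- ===== PORT B =====
-- loop body of Source B: t = -(-min_x // v); if t < 1: t = 1; if t*v <= max_x: return v, t
def stepB (min_x : Int) (max_x : Int) (v : Int) : Option (Int × Int) :=
  let t := -(PySem.Int.floordiv (-min_x) v)
  let t := if t < 1 then 1 else t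
  if t * v ≤ max_x then some (v, t) else none

-- 'for v in range(x_vel+1, max_x+1)' ported as the lazy count-up the Python range performs
def findB (min_x : Int) (max_x : Int) (v : Int) : Option (Int × Int) :=
  if _h : v ≤ max_x then
    match stepB min_x max_x v with
    | some p => some p
    | none => findB min_x max_x (v + 1)
  else none
termination_by (max_x + 1 - v).toNat
decreasing_by omega

def next_x_vel_alt (x_vel : Int) (min_x : Int) (max_x : Int) : Int × Int :=
  match findB min_x max_x (x_vel + 1) with
  | some p => p
  | none => (x_vel, 0)

-- ===== PRECONDITION & SPEC =====
-- Pre_ excludes negative starting velocities below max_x: there A diverges on almost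
-- every input (candidate velocities ≤ 0 never leave the target side), and on the thin
-- remainder where A does return, B's ceiling-division step count is only meaningful for
-- positive velocities (B raises ZeroDivisionError at candidate 0, or returns a different
-- step count for a negative candidate).
def Pre_next_x_vel (x_vel : Int) (min_x : Int) (max_x : Int) : Prop :=
  0 ≤ x_vel ∨ max_x ≤ x_vel
instance (x_vel : Int) (min_x : Int) (max_x : Int) : Decidable (Pre_next_x_vel x_vel min_x max_x) := by
  unfold Pre_next_x_vel; infer_instance

def pvWitness_next_x_vel : Int × Int × Int := (0, 3, 5)

-- On empty target ranges (min_x > max_x) with x_vel < max_x, A returns (max_x, 2) where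
-- the 2 is leftover loop state from the last exhausted inner scan; B returns (x_vel, 0)
-- (no velocity found, zero steps), the intended 'nothing found' answer.
def D_next_x_vel (x_vel : Int) (min_x : Int) (max_x : Int) : Prop :=
  x_vel < max_x ∧ max_x < min_x
instance (x_vel : Int) (min_x : Int) (max_x : Int) : Decidable (D_next_x_vel x_vel min_x max_x) := by
  unfold D_next_x_vel; infer_instance

def Spec_next_x_vel (x_vel : Int) (min_x : Int) (max_x : Int) (out : Int × Int) : Prop :=
  ¬ D_next_x_vel x_vel min_x max_x → out = next_x_vel_alt x_vel min_x max_x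
instance (x_vel : Int) (min_x : Int) (max_x : Int) (out : Int × Int) : Decidable (Spec_next_x_vel x_vel min_x max_x out) := by
  unfold Spec_next_x_vel; infer_instance

def pvDiffWitness_next_x_vel : Int × Int × Int := (0, 5, 3)
def pvDiffWitnessOut_next_x_vel : (Int × Int) × (Int × Int) := ((3, 2), (0, 0))

-- ===== CLAIM (what is proved, stated in full; the proofs are below) =====
def Claim_unchanged_next_x_vel : Prop := ∀ (x_vel : Int) (min_x : Int) (max_x : Int), Dom_next_x_vel x_vel min_x max_x → Pre_next_x_vel x_vel min_x max_x → Spec_next_x_vel x_vel min_x max_x (next_x_vel x_vel min_x max_x)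
def Claim_changed_next_x_vel : Prop := Dom_next_x_vel (pvDiffWitness_next_x_vel.1) (pvDiffWitness_next_x_vel.2.1) (pvDiffWitness_next_x_vel.2.2) ∧ Pre_next_x_vel (pvDiffWitness_next_x_vel.1) (pvDiffWitness_next_x_vel.2.1) (pvDiffWitness_next_x_vel.2.2) ∧ D_next_x_vel (pvDiffWitness_next_x_vel.1) (pvDiffWitness_next_x_vel.2.1) (pvDiffWitness_next_x_vel.2.2) ∧ next_x_vel (pvDiffWitness_next_x_vel.1) (pvDiffWitness_next_x_vel.2.1) (pvDiffWitness_next_x_vel.2.2) = pvDiffWitnessOut_next_x_vel.1 ∧ next_x_vel_alt (pvDiffWitness_next_x_vel.1) (pvDiffWitness_next_x_vel.2.1) (pvDiffWitness_next_x_vel.2.2) = pvDiffWitnessOut_next_x_vel.2 ∧ pvDiffWitnessOut_next_x_vel.1 ≠ pvDiffWitnessOut_next_x_vel.2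
def Claim_exact_next_x_vel : Prop := ∀ (x_vel : Int) (min_x : Int) (max_x : Int), Dom_next_x_vel x_vel min_x max_x → Pre_next_x_vel x_vel min_x max_x → D_next_x_vel x_vel min_x max_x → next_x_vel x_vel min_x max_x ≠ next_x_vel_alt x_vel min_x max_x

-- ===== LEMMAS AND PROOFS =====

-- B's step count for candidate v: max 1 (ceil(min_x / v))
def tBval (min_x : Int) (v : Int) : Int :=
  let t := -(PySem.Int.floordiv (-min_x) v)
  if t < 1 then 1 else t

theorem stepB_eq (min_x max_x v : Int) :
    stepB min_x max_x v =
      (if tBval min_x v * v ≤ max_x then some (v, tBval min_x v) else none) := rfl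

theorem tBval_facts (min_x v : Int) (hv : 0 < v) :
    1 ≤ tBval min_x v ∧ min_x ≤ tBval min_x v * v ∧
      ∀ t', 1 ≤ t' → t' < tBval min_x v → t' * v < min_x := by
  have hc : (-(PySem.Int.floordiv (-min_x) v) - 1) * v < min_x ∧
      min_x ≤ -(PySem.Int.floordiv (-min_x) v) * v :=
    (PySem.Int.neg_floordiv_neg_eq_iff_of_pos hv).mp rfl
  set c := -(PySem.Int.floordiv (-min_x) v) with hcdef
  unfold tBval
  rw [← hcdef]
  by_cases h1 : c < 1
  · simp only [if_pos h1]
    refine ⟨le_refl 1, ?_, ?_⟩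
    · have hcv : c * v ≤ 0 := mul_nonpos_of_nonpos_of_nonneg (by omega) (le_of_lt hv)
      have := hc.2
      omega
    · intro t' h h'; omega
  · simp only [if_neg h1]
    refine ⟨by omega, hc.2, ?_⟩
    intro t' ht1 ht2
    have : t' * v ≤ (c - 1) * v := mul_le_mul_of_nonneg_right (by omega) (le_of_lt hv)
    have := hc.1
    omega

-- the inner loop at position t*v (all earlier multiples below min_x) returns exactly B's step
theorem inner_eq (v min_x max_x : Int) (hv : 0 < v) :
    ∀ (x_pos t : Int), x_pos = t * v → 1 ≤ t →
      (∀ t', 1 ≤ t' → t' < t → t' * v < min_x) →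
      (innerA v min_x max_x x_pos t).1 = stepB min_x max_x v := by
  intro x_pos t
  induction x_pos, t using innerA.induct (v := v) (min_x := min_x) (max_x := max_x) with
  | case1 x_pos t h =>
    intro _ _ _; omega
  | case2 x_pos t h h2 h3 =>
    intro hx ht hmin
    obtain ⟨f1, f2, f3⟩ := tBval_facts min_x v hv
    rw [innerA]
    simp only [dif_neg h, dif_pos h2, if_pos h3]
    have htB : tBval min_x v = t := by
      rcases lt_trichotomy (tBval min_x v) t with hlt | heq | hgt
      · have : tBval min_x v * v < min_x := hmin _ f1 hlt
        omega
      · exact heq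
      · have : t * v < min_x := f3 t ht hgt
        omega
    rw [stepB_eq, htB, if_pos (by omega)]
  | case3 x_pos t h h2 h3 ih =>
    intro hx ht hmin
    rw [innerA]
    simp only [dif_neg h, dif_pos h2, if_neg h3]
    exact ih (by rw [hx]; ring) (by omega)
      (fun t' ht1 ht2 => by
        rcases lt_or_eq_of_le (by omega : t' ≤ t) with hlt | heq
        · exact hmin t' ht1 hlt
        · subst heq; omega)
  | case4 x_pos t h h2 =>
    intro hx ht hmin
    obtain ⟨f1, f2, f3⟩ := tBval_facts min_x v hv
    rw [innerA]
    simp only [dif_neg h, dif_neg h2]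
    rw [stepB_eq, if_neg ?_]
    intro hle
    have hlt : tBval min_x v * v < t * v := by omega
    have h4 : tBval min_x v < t := lt_of_mul_lt_mul_right (by omega) (le_of_lt hv)
    have : tBval min_x v * v < min_x := hmin _ f1 h4
    omega

-- the candidate v = max_x always succeeds when the target range is nonempty
theorem stepB_max (min_x max_x : Int) (hm : min_x ≤ max_x) (hpos : 0 < max_x) :
    stepB min_x max_x max_x = some (max_x, 1) := by
  obtain ⟨f1, f2, f3⟩ := tBval_facts min_x max_x hpos
  have h1 : tBval min_x max_x = 1 := by
    by_contra hne
    have : (1 : Int) * max_x < min_x := f3 1 le_rfl (by omega)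
    omega
  rw [stepB_eq, h1, if_pos (by omega)]

theorem findB_isSome (min_x max_x a : Int) (hm : min_x ≤ max_x) (hpos : 0 < max_x)
    (ha : a ≤ max_x) : ∃ p, findB min_x max_x a = some p := by
  induction a using findB.induct (min_x := min_x) (max_x := max_x) with
  | case1 a h p hp => rw [findB]; simp only [dif_pos h, hp]; exact ⟨p, rfl⟩
  | case2 a h hp ih =>
    have hne : a ≠ max_x := by
      intro heq
      rw [heq, stepB_max min_x max_x hm hpos] at hp
      simp at hp
    rw [findB]
    simp only [dif_pos h, hp]
    exact ih (by omega)
  | case3 a h => omega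

-- main loop equivalence on nonempty targets with nonnegative start
theorem outer_eq (n : Nat) : ∀ (x_vel min_x max_x t : Int),
    (max_x - x_vel).toNat = n → min_x ≤ max_x → 0 ≤ x_vel → x_vel < max_x →
    outerA x_vel min_x max_x t = next_x_vel_alt x_vel min_x max_x := by
  induction n using Nat.strong_induction_on with
  | _ n IH =>
    intro x_vel min_x max_x t hn hm h0 hlt
    have hinner : (innerA (x_vel + 1) min_x max_x (x_vel + 1) 1).1 =
        stepB min_x max_x (x_vel + 1) :=
      inner_eq (x_vel + 1) min_x max_x (by omega) (x_vel + 1) 1 (by ring) le_rfl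
        (fun t' h1 h2 => by omega)
    rw [outerA]
    simp only [dif_pos hlt]
    rw [next_x_vel_alt, findB]
    simp only [dif_pos (by omega : x_vel + 1 ≤ max_x)]
    rcases hs : stepB min_x max_x (x_vel + 1) with _ | p
    · -- candidate fails, recurse
      rw [hs] at hinner
      simp only [hinner]
      have hne : x_vel + 1 ≠ max_x := by
        intro heq
        rw [heq] at hs
        rw [stepB_max min_x max_x hm (by omega)] at hs
        simp at hs
      have hrec := IH (max_x - (x_vel + 1)).toNat (by omega)
        (x_vel + 1) min_x max_x (innerA (x_vel + 1) min_x max_x (x_vel + 1) 1).2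
        rfl hm (by omega) (by omega)
      rw [hrec, next_x_vel_alt]
      obtain ⟨q, hq⟩ := findB_isSome min_x max_x (x_vel + 1 + 1) hm (by omega) (by omega)
      rw [hq]
    · rw [hs] at hinner
      simp only [hinner]

-- the inner loop never fires on an empty target
theorem inner_none (v min_x max_x : Int) (hm : max_x < min_x) :
    ∀ (x_pos t : Int), (innerA v min_x max_x x_pos t).1 = none := by
  intro x_pos t
  induction x_pos, t using innerA.induct (v := v) (min_x := min_x) (max_x := max_x) with
  | case1 x_pos t h => rw [innerA]; simp [h]
  | case2 x_pos t h h2 h3 => omega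
  | case3 x_pos t h h2 h3 ih =>
    rw [innerA]; simp only [dif_neg h, dif_pos h2, if_neg h3]; exact ih
  | case4 x_pos t h h2 => rw [innerA]; simp [h, h2]

-- on an empty target A's outer loop runs x_vel up to max_x
theorem outer_empty (min_x max_x : Int) (hm : max_x < min_x) : ∀ (n : Nat),
    ∀ (x_vel t : Int), (max_x - x_vel).toNat = n → x_vel ≤ max_x →
    (outerA x_vel min_x max_x t).1 = max_x := by
  intro n
  induction n using Nat.strong_induction_on with
  | _ n IH =>
    intro x_vel t hn hle
    rw [outerA]
    by_cases h : x_vel < max_x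
    · simp only [dif_pos h, inner_none (x_vel + 1) min_x max_x hm]
      exact IH (max_x - (x_vel + 1)).toNat (by omega) (x_vel + 1) _ rfl (by omega)
    · simp only [dif_neg h]
      omega

-- B's scan finds nothing on an empty target
theorem findB_empty (min_x max_x : Int) (hm : max_x < min_x) :
    ∀ (v : Int), 0 < v → findB min_x max_x v = none := by
  intro v
  induction v using findB.induct (min_x := min_x) (max_x := max_x) with
  | case1 v h p hp =>
    intro hv
    exfalso
    obtain ⟨f1, f2, f3⟩ := tBval_facts min_x v hv
    rw [stepB_eq] at hp
    by_cases hle : tBval min_x v * v ≤ max_x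
    · omega
    · rw [if_neg hle] at hp; simp at hp
  | case2 v h hp ih =>
    intro hv
    rw [findB]
    simp only [dif_pos h, hp]
    exact ih (by omega)
  | case3 v h =>
    intro _
    rw [findB]
    simp only [dif_neg h]

-- B returns (x_vel, 0) on an empty target
theorem alt_empty (x_vel min_x max_x : Int) (hm : max_x < min_x) (h0 : 0 ≤ x_vel) :
    next_x_vel_alt x_vel min_x max_x = (x_vel, 0) := by
  rw [next_x_vel_alt, findB_empty min_x max_x hm (x_vel + 1) (by omega)]

-- ===== VERDICT (by name: the statement is the Claim_ definition above) =====
theorem next_x_vel_spec : Claim_unchanged_next_x_vel := by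
  intro x_vel min_x max_x _hdom hpre hnD
  by_cases hlt : x_vel < max_x
  · have h0 : 0 ≤ x_vel := by
      rcases hpre with h | h
      · exact h
      · omega
    have hm : min_x ≤ max_x := by
      unfold D_next_x_vel at hnD
      by_contra hc
      exact hnD ⟨hlt, by omega⟩
    exact outer_eq (max_x - x_vel).toNat x_vel min_x max_x 0 rfl hm h0 hlt
  · rw [next_x_vel, outerA]
    simp only [dif_neg hlt]
    rw [next_x_vel_alt, findB]
    simp only [dif_neg (by omega : ¬ x_vel + 1 ≤ max_x)]

theorem next_x_vel_changed : Claim_changed_next_x_vel := by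
  unfold Claim_changed_next_x_vel
  refine ⟨by decide, by decide, by decide, ?_, ?_, by decide⟩
  · show next_x_vel 0 5 3 = ((3 : Int), (2 : Int))
    rw [next_x_vel]
    simp [outerA, innerA]
  · show next_x_vel_alt 0 5 3 = ((0 : Int), (0 : Int))
    rw [next_x_vel_alt]
    simp [findB, show stepB 5 3 1 = none from by decide,
      show stepB 5 3 2 = none from by decide, show stepB 5 3 3 = none from by decide]

theorem next_x_vel_tight : Claim_exact_next_x_vel := by
  intro x_vel min_x max_x _hdom hpre hD
  obtain ⟨hlt, hm⟩ := hD
  have h0 : 0 ≤ x_vel := by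
    rcases hpre with h | h
    · exact h
    · omega
  intro heq
  have hA : (next_x_vel x_vel min_x max_x).1 = max_x :=
    outer_empty min_x max_x hm (max_x - x_vel).toNat x_vel 0 rfl (by omega)
  rw [alt_empty x_vel min_x max_x hm h0] at heq
  rw [heq] at hA
  simp at hA
  omega
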